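-- pv_equiv track=rewrite | github.com/eazeon/myprojectedrpg | projectrpg.py | format_selected_items_display
-- ===== SOURCE A (Python) =====
-- def format_selected_items_display(items_list):
--     """Format the selected items display with counts (e.g., 'Potion x2, Épée x1')"""
--     if not items_list:
--         return "Aucun \u00e9l\u00e9ment s\u00e9lectionn\u00e9"
--
--     # Count occurrences of each item
--     item_counts = {}
--     for item in items_list:
--         item_counts[item] = item_counts.get(item, 0) + 1
--
--     # Format as "Item x count"
--     formatted_items = [f"{item} x{count}" if count > 1 else item for item, count in item_counts.items()]
--     return ", ".join(formatted_items)
-- ===== SOURCE B (Python) =====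
-- def format_selected_items_display(items_list):
--     """Format the selected items display with counts (e.g., 'Potion x2, Épée x1')"""
--     if not items_list:
--         return "Aucun \u00e9l\u00e9ment s\u00e9lectionn\u00e9"
--
--     # Count-and-remove: repeatedly take the first remaining item, count all its
--     # occurrences, and strip them from the remaining work list.  No dict at all.
--     out = []
--     rest = items_list
--     while rest:
--         head = rest[0]
--         tail = rest[1:]
--         count = 1 + tail.count(head)
--         rest = [x for x in tail if x != head]
--         out.append(f"{head} x{count}" if count > 1 else head)
--     return ", ".join(out)
-- ===== Notes on version B (the rewrite author's own statement) =====
-- stated objective: alternative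
-- what changed: Replaced the single-pass dict tally with a dict-free count-and-remove loop: repeatedly take the first remaining item, count its occurrences, and filter them out of the shrinking work list.
import Mathlib
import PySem

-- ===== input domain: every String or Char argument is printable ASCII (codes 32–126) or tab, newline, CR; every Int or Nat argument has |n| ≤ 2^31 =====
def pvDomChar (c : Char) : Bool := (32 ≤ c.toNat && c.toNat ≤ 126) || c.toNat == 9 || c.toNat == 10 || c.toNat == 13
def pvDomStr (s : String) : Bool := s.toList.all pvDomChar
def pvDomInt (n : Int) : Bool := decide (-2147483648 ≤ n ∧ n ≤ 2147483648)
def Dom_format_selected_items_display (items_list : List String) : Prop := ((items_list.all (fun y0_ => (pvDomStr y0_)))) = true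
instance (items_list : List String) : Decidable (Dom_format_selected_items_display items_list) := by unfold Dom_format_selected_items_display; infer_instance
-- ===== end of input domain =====

-- ===== PORT A =====
-- B drops A's dict tally for a count-and-remove loop over a shrinking work list (same result; alternative decomposition).
def format_selected_items_display (items_list : List String) : String :=
  if items_list = [] then "Aucun élément sélectionné"
  else
    let item_counts : PySem.Dict String Int :=
      items_list.foldl (fun d item => d.insert item (d.getD item 0 + 1)) PySem.Dict.empty
    let formatted_items : List String :=
      item_counts.items.map (fun p => if p.2 > 1 then p.1 ++ " x" ++ PySem.Int.toStr p.2 else p.1)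
    PySem.Str.join ", " formatted_items

-- ===== PORT B =====
-- the while loop of Source B: take the head, count it in the tail, filter it out, emit its entry
def pvLoop (rest : List String) : List String :=
  match rest with
  | [] => []
  | head :: tail =>
    let count : Int := 1 + (tail.count head : Int)
    (if count > 1 then head ++ " x" ++ PySem.Int.toStr count else head)
      :: pvLoop (tail.filter (fun x => x != head))
termination_by rest.length
decreasing_by simpa using Nat.lt_succ_of_le (List.length_filter_le _ _)

def format_selected_items_display_alt (items_list : List String) : String :=
  if items_list = [] then "Aucun élément sélectionné"
  else PySem.Str.join ", " (pvLoop items_list)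

-- ===== PRECONDITION & SPEC =====
def Spec_format_selected_items_display (items_list : List String) (out : String) : Prop := out = format_selected_items_display_alt items_list
instance (items_list : List String) (out : String) : Decidable (Spec_format_selected_items_display items_list out) := by unfold Spec_format_selected_items_display; infer_instance

-- ===== CLAIM =====
def Claim_equal_format_selected_items_display : Prop := ∀ (items_list : List String), Dom_format_selected_items_display items_list → Spec_format_selected_items_display items_list (format_selected_items_display items_list)

-- ===== LEMMAS AND PROOFS =====

-- adding an element already in s (seen through later adds) is a no-op; contains persists
lemma pv_contains_add {α : Type} [BEq α] (s : PySem.Set α) (x h : α)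
    (hc : s.contains h = true) : (PySem.Set.add s x).contains h = true := by
  unfold PySem.Set.add
  split
  · exact hc
  · simpa [PySem.Set.contains, List.contains_append] using Or.inl (by simpa [PySem.Set.contains] using hc)

-- elements equal to h are absorbed once h is in the accumulator
lemma pv_foldl_add_filter {α : Type} [BEq α] [LawfulBEq α] (t : List α) (acc : PySem.Set α) (h : α)
    (hc : acc.contains h = true) :
    List.foldl PySem.Set.add acc t = List.foldl PySem.Set.add acc (t.filter (fun x => x != h)) := by
  induction t generalizing acc with
  | nil => rfl
  | cons y ys ih =>
    by_cases hy : y = h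
    · subst hy
      simp only [List.filter_cons, bne_self_eq_false, Bool.false_eq_true, List.foldl_cons]
      have : PySem.Set.add acc y = acc := by
        unfold PySem.Set.add; rw [if_pos hc]
      rw [this]
      exact ih acc hc
    · simp only [List.filter_cons, bne, List.foldl_cons]
      have : (y == h) = false := by simpa using hy
      simp only [this, Bool.not_false]
      exact ih _ (pv_contains_add acc y h hc)

-- once the accumulator starts with h and no later element equals h, the h stays in front
lemma pv_foldl_add_cons {α : Type} [BEq α] [LawfulBEq α] (t : List α) (s : List α) (h : α)
    (hne : ∀ x ∈ t, x ≠ h) :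
    List.foldl PySem.Set.add (h :: s) t = h :: List.foldl PySem.Set.add s t := by
  induction t generalizing s with
  | nil => rfl
  | cons y ys ih =>
    have hy : y ≠ h := hne y (List.mem_cons_self)
    have step : PySem.Set.add (h :: s) y = h :: PySem.Set.add s y := by
      unfold PySem.Set.add
      have : ((h :: s : List α).contains y) = s.contains y := by
        simp [show (y == h) = false by simpa using hy]
      simp only [PySem.Set.contains, this]
      split <;> simp_all
    rw [List.foldl_cons, step, List.foldl_cons, ih _ (fun x hx => hne x (List.mem_cons_of_mem _ hx))]

lemma pv_dedup_cons {α : Type} [BEq α] [LawfulBEq α] (h : α) (t : List α) :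
    PySem.List.dedup (h :: t) = h :: PySem.List.dedup (t.filter (fun x => x != h)) := by
  unfold PySem.List.dedup PySem.Set.ofList
  rw [List.foldl_cons]
  have e0 : PySem.Set.add PySem.Set.empty h = (h :: [] : List α) := by
    unfold PySem.Set.add PySem.Set.empty PySem.Set.contains; simp
  rw [e0, pv_foldl_add_filter t _ h (by simp [PySem.Set.contains]),
      pv_foldl_add_cons _ _ _ (fun x hx => by
        have := List.of_mem_filter hx; simpa using this)]
  rfl

-- the while loop produces exactly A's per-unique-item entries
lemma pv_loop_eq (lst : List String) :
    pvLoop lst = (PySem.List.dedup lst).map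
      (fun u => if ((lst.count u : Int)) > 1 then u ++ " x" ++ PySem.Int.toStr (lst.count u : Int) else u) := by
  induction lst using pvLoop.induct with
  | case1 => simp [pvLoop, PySem.List.dedup, PySem.Set.ofList]
  | case2 head tail ih =>
    rw [pvLoop, pv_dedup_cons, List.map_cons]
    congr 1
    · have h1 : ((head :: tail).count head : Int) = 1 + (tail.count head : Int) := by
        simp; ring
      rw [h1]
    · simp only [List.unattach_filter, List.unattach_attach] at ih
      rw [ih]
      apply List.map_congr_left
      intro u hu
      have hu' : u ∈ tail.filter (fun x => x != head) := by
        rw [PySem.List.dedup_eq_ofList] at hu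
        exact (PySem.Set.mem_ofList _ _).mp hu
      have hne : (u == head) = false := by
        have := List.of_mem_filter hu'; simpa [bne] using this
      have hne2 : ¬ head = u := fun e => by simp [e] at hne
      have hcnt : (tail.filter (fun x => x != head)).count u = (head :: tail).count u := by
        rw [List.count_filter (by simp [bne]; exact fun e => hne2 e.symm)]
        simp [hne2]
      rw [hcnt]

-- ===== VERDICT =====
theorem format_selected_items_display_spec : Claim_equal_format_selected_items_display := by
  intro items_list _
  unfold Spec_format_selected_items_display format_selected_items_display format_selected_items_display_alt
  by_cases h : items_list = []
  · simp [h]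
  · simp only [if_neg h]
    rw [PySem.Dict.foldl_insert_getD_add_one_eq_counter, PySem.Dict.items_counter,
        pv_loop_eq, List.map_map, PySem.List.dedup_eq_ofList]
    rfl
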